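-- pv_equiv track=rewrite | github.com/mattiamonta/Esercizi-python | studenti_medie_voti.py | raggruppa_per_media
-- ===== SOURCE A (Python) =====
-- def raggruppa_per_media(diz):
--     voto_medio_studenti = dict()
--     k1 = [18,23]
--     k2 = [24,26]
--     k3 = [27,30]
--     k1_studenti = []    #contiene le medie voti comprese tra 18 e 23
--     k2_studenti = []    #contiene le medie voti comprese tra 24 e 26
--     k3_studenti = []    #contiene le medie voti comprese tra 27 e 30
--     for studente in diz:
--         somma_voti = 0
--         trovato_lode = False
--         for voto_lode in diz[studente]:
--             somma_voti += voto_lode[0]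
--             if voto_lode[1] == True:
--                 trovato_lode = True
--
--         media = somma_voti // len(diz[studente])
--         if trovato_lode:
--             media += 1
--
--         if media>=min(k1) and media<=max(k1):
--             k1_studenti.append(studente)
--         elif media>=min(k2) and media<=max(k2):
--             k2_studenti.append(studente)
--         elif media>=min(k3) and media<=max(k3):
--             k3_studenti.append(studente)
--
--     voto_medio_studenti[str(k1)] = k1_studenti
--     voto_medio_studenti[str(k2)] = k2_studenti
--     voto_medio_studenti[str(k3)] = k3_studenti
--     return voto_medio_studenti
-- ===== SOURCE B (Python) =====
-- def raggruppa_per_media(diz):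
--     def media(voti):
--         m = sum(v for v, _ in voti) // len(voti)
--         if any(l for _, l in voti):
--             m += 1
--         return m
--     medie = [(s, media(v)) for s, v in diz.items()]
--     return {
--         "[18, 23]": [s for s, m in medie if 18 <= m <= 23],
--         "[24, 26]": [s for s, m in medie if 24 <= m <= 26],
--         "[27, 30]": [s for s, m in medie if 27 <= m <= 30],
--     }
-- ===== Notes on version B (the rewrite author's own statement) =====
-- stated objective: alternative
-- what changed: A classifies each student inside one pass with an elif chain and dict lookups per key; B first builds an intermediate list of (student, average) pairs in one aggregation pass, then produces each bucket by an independent filter pass over that list.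
import Mathlib
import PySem

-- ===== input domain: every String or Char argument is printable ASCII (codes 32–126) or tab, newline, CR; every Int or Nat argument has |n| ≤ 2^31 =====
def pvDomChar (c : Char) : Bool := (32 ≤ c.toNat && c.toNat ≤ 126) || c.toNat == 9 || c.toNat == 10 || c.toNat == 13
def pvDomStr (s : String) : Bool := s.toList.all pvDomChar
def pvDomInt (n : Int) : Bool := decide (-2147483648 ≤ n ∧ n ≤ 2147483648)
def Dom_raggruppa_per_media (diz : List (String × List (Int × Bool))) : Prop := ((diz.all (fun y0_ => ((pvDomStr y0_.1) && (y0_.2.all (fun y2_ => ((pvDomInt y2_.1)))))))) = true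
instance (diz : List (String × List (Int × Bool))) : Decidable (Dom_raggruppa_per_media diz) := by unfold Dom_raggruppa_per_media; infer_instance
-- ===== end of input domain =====

-- B separates aggregation from classification: one pass builds (student, average) pairs,
-- then each bucket is an independent filter pass (objective: alternative decomposition).


-- ===== PORT A =====
def raggruppa_per_media (diz : List (String × List (Int × Bool))) : List (String × List String) :=
  let d := PySem.Dict.mk diz
  let res := d.keys.foldl (fun (acc : List String × List String × List String) studente =>
      let voti := d.getD studente []
      let st := voti.foldl (fun (st : Int × Bool) voto_lode =>
          (st.1 + voto_lode.1, if voto_lode.2 == true then true else st.2)) (0, false)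
      let media0 := PySem.Int.floordiv st.1 (voti.length : Int)
      let media := if st.2 then media0 + 1 else media0
      if media ≥ min (18:Int) 23 ∧ media ≤ max (18:Int) 23 then (acc.1 ++ [studente], acc.2.1, acc.2.2)
      else if media ≥ min (24:Int) 26 ∧ media ≤ max (24:Int) 26 then (acc.1, acc.2.1 ++ [studente], acc.2.2)
      else if media ≥ min (27:Int) 30 ∧ media ≤ max (27:Int) 30 then (acc.1, acc.2.1, acc.2.2 ++ [studente])
      else acc) (([] : List String), ([] : List String), ([] : List String))
  [("[18, 23]", res.1), ("[24, 26]", res.2.1), ("[27, 30]", res.2.2)]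

-- ===== PORT B =====
def pvMediaB (voti : List (Int × Bool)) : Int :=
  let m := PySem.Int.floordiv (voti.map Prod.fst).sum (voti.length : Int)
  if voti.any Prod.snd then m + 1 else m

def raggruppa_per_media_alt (diz : List (String × List (Int × Bool))) : List (String × List String) :=
  let medie := diz.map (fun p => (p.1, pvMediaB p.2))
  [("[18, 23]", (medie.filter (fun p => 18 ≤ p.2 && p.2 ≤ 23)).map Prod.fst),
   ("[24, 26]", (medie.filter (fun p => 24 ≤ p.2 && p.2 ≤ 26)).map Prod.fst),
   ("[27, 30]", (medie.filter (fun p => 27 ≤ p.2 && p.2 ≤ 30)).map Prod.fst)]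

-- ===== PRECONDITION & SPEC =====
-- Pre_ excludes students with an empty grade list, on which A raises ZeroDivisionError, and
-- duplicate keys, which a Python dict cannot represent (the assoc list encodes a real dict).
def Pre_raggruppa_per_media (diz : List (String × List (Int × Bool))) : Prop :=
  (diz.map Prod.fst).Nodup ∧ ∀ p ∈ diz, p.2 ≠ []
instance (diz : List (String × List (Int × Bool))) : Decidable (Pre_raggruppa_per_media diz) := by
  unfold Pre_raggruppa_per_media; infer_instance

def pvWitness_raggruppa_per_media : (List (String × List (Int × Bool))) :=
  [("anna", [(28, true), (30, false)]), ("bob", [(18, false)])]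

def Spec_raggruppa_per_media (diz : List (String × List (Int × Bool))) (out : List (String × List String)) : Prop := out = raggruppa_per_media_alt diz
instance (diz : List (String × List (Int × Bool))) (out : List (String × List String)) : Decidable (Spec_raggruppa_per_media diz out) := by unfold Spec_raggruppa_per_media; infer_instance

-- ===== CLAIM (what is proved, stated in full; the proofs are below) =====
def Claim_equal_raggruppa_per_media : Prop := ∀ (diz : List (String × List (Int × Bool))), Dom_raggruppa_per_media diz → Pre_raggruppa_per_media diz → Spec_raggruppa_per_media diz (raggruppa_per_media diz)

-- ===== LEMMAS AND PROOFS =====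

-- the inner grade loop computes (sum, any-lode)
theorem pv_inner_fold (voti : List (Int × Bool)) (a : Int) (b : Bool) :
    voti.foldl (fun (st : Int × Bool) voto_lode =>
        (st.1 + voto_lode.1, if voto_lode.2 == true then true else st.2)) (a, b)
      = (a + (voti.map Prod.fst).sum, b || voti.any Prod.snd) := by
  induction voti generalizing a b with
  | nil => simp
  | cons p t ih =>
    simp only [List.foldl_cons, ih, List.map_cons, List.sum_cons, List.any_cons]
    cases p.2 <;> cases b <;> simp <;> ring

-- A's per-student step, expressed on the pair (student, grades) directly
def pvStepA (acc : List String × List String × List String)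
    (p : String × List (Int × Bool)) : List String × List String × List String :=
  let media := pvMediaB p.2
  if media ≥ min (18:Int) 23 ∧ media ≤ max (18:Int) 23 then (acc.1 ++ [p.1], acc.2.1, acc.2.2)
  else if media ≥ min (24:Int) 26 ∧ media ≤ max (24:Int) 26 then (acc.1, acc.2.1 ++ [p.1], acc.2.2)
  else if media ≥ min (27:Int) 30 ∧ media ≤ max (27:Int) 30 then (acc.1, acc.2.1, acc.2.2 ++ [p.1])
  else acc

-- A's loop body as written in the port, parameterised by the dict it looks keys up in
def pvStepAKey (d : PySem.Dict String (List (Int × Bool)))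
    (acc : List String × List String × List String) (studente : String) :
    List String × List String × List String :=
  let voti := d.getD studente []
  let st := voti.foldl (fun (st : Int × Bool) voto_lode =>
      (st.1 + voto_lode.1, if voto_lode.2 == true then true else st.2)) (0, false)
  let media0 := PySem.Int.floordiv st.1 (voti.length : Int)
  let media := if st.2 then media0 + 1 else media0
  if media ≥ min (18:Int) 23 ∧ media ≤ max (18:Int) 23 then (acc.1 ++ [studente], acc.2.1, acc.2.2)
  else if media ≥ min (24:Int) 26 ∧ media ≤ max (24:Int) 26 then (acc.1, acc.2.1 ++ [studente], acc.2.2)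
  else if media ≥ min (27:Int) 30 ∧ media ≤ max (27:Int) 30 then (acc.1, acc.2.1, acc.2.2 ++ [studente])
  else acc

theorem pvStepAKey_eq (d : PySem.Dict String (List (Int × Bool))) (acc) (s : String)
    (v : List (Int × Bool)) (hv : d.getD s [] = v) :
    pvStepAKey d acc s = pvStepA acc (s, v) := by
  simp only [pvStepAKey, hv, pv_inner_fold, zero_add, Bool.false_or, pvStepA, pvMediaB]

theorem pv_keys_fold (diz : List (String × List (Int × Bool))) :
    (diz.map Prod.fst).Nodup → ∀ (acc : List String × List String × List String),
    (PySem.Dict.mk diz).keys.foldl (pvStepAKey (PySem.Dict.mk diz)) acc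
      = diz.foldl pvStepA acc := by
  induction diz with
  | nil => intro _ acc; simp [PySem.Dict.keys_mk]
  | cons hd t ih =>
    intro hnd acc
    obtain ⟨k, v⟩ := hd
    simp only [List.map_cons, List.nodup_cons, List.mem_map] at hnd
    obtain ⟨hk, hndt⟩ := hnd
    have hhead : (PySem.Dict.mk ((k, v) :: t)).getD k [] = v := by
      rw [PySem.Dict.getD_eq_get?_getD, PySem.Dict.get?_mk_cons]; simp
    have hcongr : List.foldl (pvStepAKey (PySem.Dict.mk ((k, v) :: t)))
        (pvStepA acc (k, v)) (t.map Prod.fst)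
        = List.foldl (pvStepAKey (PySem.Dict.mk t)) (pvStepA acc (k, v)) (t.map Prod.fst) := by
      apply PySem.List.foldl_congr_mem
      intro a s hs
      have hne : (k == s) = false := by
        simp only [List.mem_map] at hs
        obtain ⟨p, hp, rfl⟩ := hs
        have hne' : p.1 ≠ k := fun h => hk ⟨p, hp, h⟩
        simp only [beq_eq_false_iff_ne]
        exact fun h => hne' h.symm
      have hgd : (PySem.Dict.mk ((k, v) :: t)).getD s [] = (PySem.Dict.mk t).getD s [] := by
        rw [PySem.Dict.getD_eq_get?_getD, PySem.Dict.get?_mk_cons, hne]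
        simp [PySem.Dict.getD_eq_get?_getD]
      simp only [pvStepAKey, hgd]
    have hkeys : (PySem.Dict.mk ((k, v) :: t)).keys = k :: t.map Prod.fst := by
      simp [PySem.Dict.keys_mk]
    rw [hkeys, List.foldl_cons, pvStepAKey_eq _ _ _ _ hhead, hcongr]
    have := ih hndt (pvStepA acc (k, v))
    rw [PySem.Dict.keys_mk] at this
    rw [this, List.foldl_cons]

theorem pv_fold_filters (diz : List (String × List (Int × Bool)))
    (l1 l2 l3 : List String) :
    diz.foldl pvStepA (l1, l2, l3)
      = (l1 ++ ((diz.map (fun p => (p.1, pvMediaB p.2))).filter (fun p => 18 ≤ p.2 && p.2 ≤ 23)).map Prod.fst,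
         l2 ++ ((diz.map (fun p => (p.1, pvMediaB p.2))).filter (fun p => 24 ≤ p.2 && p.2 ≤ 26)).map Prod.fst,
         l3 ++ ((diz.map (fun p => (p.1, pvMediaB p.2))).filter (fun p => 27 ≤ p.2 && p.2 ≤ 30)).map Prod.fst) := by
  induction diz generalizing l1 l2 l3 with
  | nil => simp
  | cons p t ih =>
    simp only [List.foldl_cons, List.map_cons, List.filter_cons]
    rw [pvStepA]
    set m := pvMediaB p.2 with hm
    by_cases h1 : m ≥ min (18:Int) 23 ∧ m ≤ max (18:Int) 23
    · have e1 : (18 ≤ m && m ≤ 23) = true := by simp; omega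
      have e2 : (24 ≤ m && m ≤ 26) = false := by simp; omega
      have e3 : (27 ≤ m && m ≤ 30) = false := by simp; omega
      simp only [if_pos h1, e1, e2, e3, ih]
      simp
    · by_cases h2 : m ≥ min (24:Int) 26 ∧ m ≤ max (24:Int) 26
      · have e1 : (18 ≤ m && m ≤ 23) = false := by simp; omega
        have e2 : (24 ≤ m && m ≤ 26) = true := by simp; omega
        have e3 : (27 ≤ m && m ≤ 30) = false := by simp; omega
        simp only [if_neg h1, if_pos h2, e1, e2, e3, ih]
        simp
      · by_cases h3 : m ≥ min (27:Int) 30 ∧ m ≤ max (27:Int) 30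
        · have e1 : (18 ≤ m && m ≤ 23) = false := by simp; omega
          have e2 : (24 ≤ m && m ≤ 26) = false := by simp; omega
          have e3 : (27 ≤ m && m ≤ 30) = true := by simp; omega
          simp only [if_neg h1, if_neg h2, if_pos h3, e1, e2, e3, ih]
          simp
        · have e1 : (18 ≤ m && m ≤ 23) = false := by simp at h1 ⊢; omega
          have e2 : (24 ≤ m && m ≤ 26) = false := by simp at h2 ⊢; omega
          have e3 : (27 ≤ m && m ≤ 30) = false := by simp at h3 ⊢; omega
          simp only [if_neg h1, if_neg h2, if_neg h3, e1, e2, e3, ih]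
          simp

-- the port, rewritten through the named step function (definitional)
theorem pv_portA_eq (diz : List (String × List (Int × Bool))) :
    raggruppa_per_media diz =
      (let res := (PySem.Dict.mk diz).keys.foldl (pvStepAKey (PySem.Dict.mk diz))
          (([] : List String), ([] : List String), ([] : List String))
       [("[18, 23]", res.1), ("[24, 26]", res.2.1), ("[27, 30]", res.2.2)]) := rfl

-- ===== VERDICT (by name: the statement is the Claim_ definition above) =====
theorem raggruppa_per_media_spec : Claim_equal_raggruppa_per_media := by
  intro diz _ hpre
  obtain ⟨hnd, _⟩ := hpre
  unfold Spec_raggruppa_per_media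
  rw [pv_portA_eq]
  simp only [pv_keys_fold diz hnd, pv_fold_filters, raggruppa_per_media_alt]
  simp
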